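-- pv_equiv track=rewrite | github.com/ai-kmu/etc | algorithm/2021/0308_ Integer Break/hyejin.py | saperate_k
-- ===== SOURCE A (Python) =====
-- def saperate_k(n, num_of_k):
--     product = 1
--     for i in range(num_of_k):
--         k = n//num_of_k
--         product *= k
--         num_of_k -= 1
--         n -= k
--     return product
-- ===== SOURCE B (Python) =====
-- def saperate_k(n, num_of_k):
--     if num_of_k <= 0:
--         return 1
--     q, r = divmod(n, num_of_k)
--     return (q + 1) ** r * q ** (num_of_k - r)
-- ===== Notes on version B (the rewrite author's own statement) =====
-- stated objective: faster
-- what changed: Replaces the O(num_of_k) loop of repeated floor divisions with the closed form (q+1)^r * q^(num_of_k-r) where q, r = divmod(n, num_of_k), computed with built-in exponentiation.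
import Mathlib
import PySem

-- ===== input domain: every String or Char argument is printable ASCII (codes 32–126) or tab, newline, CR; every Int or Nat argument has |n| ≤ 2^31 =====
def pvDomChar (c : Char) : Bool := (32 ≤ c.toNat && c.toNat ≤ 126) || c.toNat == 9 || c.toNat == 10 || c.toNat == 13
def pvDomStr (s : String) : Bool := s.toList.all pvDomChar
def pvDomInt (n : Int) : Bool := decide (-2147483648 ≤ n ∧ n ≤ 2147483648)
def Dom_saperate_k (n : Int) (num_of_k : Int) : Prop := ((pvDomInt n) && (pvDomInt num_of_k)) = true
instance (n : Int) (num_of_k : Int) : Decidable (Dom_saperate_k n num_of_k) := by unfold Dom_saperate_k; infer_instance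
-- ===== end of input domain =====

-- B replaces A's O(num_of_k) division loop by the closed form (q+1)^r * q^(num_of_k-r), q,r = divmod(n,num_of_k) (faster).

-- ===== PORT A =====
-- loop state: (product, num_of_k, n); the loop index i is unused by the body
def saperate_k (n : Int) (num_of_k : Int) : Int :=
  (((PySem.List.pyRange 0 num_of_k 1).foldl
      (fun (st : Int × Int × Int) _ =>
        let k := PySem.Int.floordiv st.2.2 st.2.1
        (st.1 * k, st.2.1 - 1, st.2.2 - k))
      (1, num_of_k, n))).1

-- ===== PORT B =====
def saperate_k_alt (n : Int) (num_of_k : Int) : Int :=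
  if num_of_k ≤ 0 then 1
  else
    let q := PySem.Int.floordiv n num_of_k
    let r := PySem.Int.mod n num_of_k
    (q + 1) ^ r.toNat * q ^ (num_of_k - r).toNat

-- ===== PRECONDITION & SPEC =====
def Spec_saperate_k (n : Int) (num_of_k : Int) (out : Int) : Prop := out = saperate_k_alt n num_of_k
instance (n : Int) (num_of_k : Int) (out : Int) : Decidable (Spec_saperate_k n num_of_k out) := by unfold Spec_saperate_k; infer_instance

-- ===== CLAIM (what is proved, stated in full; the proofs are below) =====
def Claim_equal_saperate_k : Prop := ∀ (n : Int) (num_of_k : Int), Dom_saperate_k n num_of_k → Spec_saperate_k n num_of_k (saperate_k n num_of_k)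

-- ===== LEMMAS AND PROOFS =====

-- the loop body of A as a plain function on the state (product, num_of_k, n)
def pvStepF (st : Int × Int × Int) : Int × Int × Int :=
  (st.1 * PySem.Int.floordiv st.2.2 st.2.1, st.2.1 - 1, st.2.2 - PySem.Int.floordiv st.2.2 st.2.1)

-- the loop of A, as recursion on the iteration count
def pvLoop : Nat → Int → Int → Int
  | 0, _, p => p
  | m + 1, n, p =>
      let k := PySem.Int.floordiv n (m + 1)
      pvLoop m (n - k) (p * k)

-- a fold whose body ignores the element only sees the list's length
lemma foldl_const_iterate {α β : Type} (f : α → α) :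
    ∀ (l : List β) (init : α), l.foldl (fun s _ => f s) init = f^[l.length] init := by
  intro l
  induction l with
  | nil => intro init; simp
  | cons x xs ih => intro init; simp [List.foldl_cons, ih, Function.iterate_succ_apply]

lemma iterate_pvStepF : ∀ (m : Nat) (n p : Int),
    (pvStepF^[m] (p, (m : Int), n)).1 = pvLoop m n p := by
  intro m
  induction m with
  | zero => intro n p; simp [pvLoop]
  | succ m ih =>
      intro n p
      rw [Function.iterate_succ_apply]
      have h1 : ((m + 1 : Nat) : Int) - 1 = (m : Int) := by push_cast; ring
      show (pvStepF^[m] (p * PySem.Int.floordiv n ((m+1:Nat) : Int), ((m+1:Nat):Int) - 1,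
          n - PySem.Int.floordiv n ((m+1:Nat):Int))).1 = pvLoop (m+1) n p
      rw [h1, ih]
      simp only [pvLoop]
      push_cast
      ring_nf

-- closed form for pvLoop
lemma pvLoop_closed : ∀ (m : Nat), 0 < m → ∀ (n p : Int),
    pvLoop m n p = p * ((PySem.Int.floordiv n m + 1) ^ (PySem.Int.mod n m).toNat *
      PySem.Int.floordiv n m ^ ((m : Int) - PySem.Int.mod n m).toNat) := by
  intro m
  induction m with
  | zero => intro h; omega
  | succ m ih =>
      intro _ n p
      have hm1 : (0:Int) < ((m+1 : Nat) : Int) := by exact_mod_cast Nat.succ_pos m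
      set q := PySem.Int.floordiv n ((m+1 : Nat) : Int) with hq
      set r := PySem.Int.mod n ((m+1 : Nat) : Int) with hr
      have hsum : q * ((m+1 : Nat) : Int) + r = n := PySem.Int.floordiv_mul_add_mod n _
      have hr0 : 0 ≤ r := PySem.Int.mod_nonneg _ hm1
      have hrlt : r < ((m+1 : Nat) : Int) := PySem.Int.mod_lt _ hm1
      show pvLoop m (n - q) (p * q) = _
      rcases Nat.eq_zero_or_pos m with hm | hm
      · subst hm
        have hreq : r = 0 := by omega
        simp only [pvLoop, hreq]
        norm_num
      · have hmpos : (0:Int) < (m : Int) := by exact_mod_cast hm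
        rw [ih hm]
        have hfd : PySem.Int.floordiv (n - q) (m : Int) = (n - q) / (m : Int) :=
          PySem.Int.floordiv_eq_ediv_of_pos hmpos
        have hmd : PySem.Int.mod (n - q) (m : Int) = (n - q) % (m : Int) :=
          PySem.Int.mod_eq_emod_of_pos hmpos
        have hnq : n - q = q * (m : Int) + r := by push_cast at hsum; linear_combination -hsum
        by_cases hcase : r = (m : Int)
        · -- the remainder is exhausted: all m remaining parts are q+1
          have hnq' : n - q = (q + 1) * (m : Int) := by rw [hnq, hcase]; ring
          have hdiv : (n - q) / (m : Int) = q + 1 := by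
            rw [hnq']; exact Int.mul_ediv_cancel _ (by omega)
          have hmod : (n - q) % (m : Int) = 0 := by rw [hnq']; simp [Int.mul_emod_left]
          rw [hfd, hmd, hdiv, hmod]
          have e1 : ((m:Int) - 0).toNat = m := by omega
          have e2 : r.toNat = m := by omega
          have e3 : (((m+1:Nat):Int) - r).toNat = 1 := by omega
          rw [e1, e2, e3]
          simp only [Int.toNat_zero, pow_zero]
          ring
        · -- r parts of q+1 and m-r parts of q remain
          have hrlt' : r < (m : Int) := by omega
          have hdiv : (n - q) / (m : Int) = q := by
            rw [hnq, add_comm, Int.add_mul_ediv_right r q (by omega : (m:Int) ≠ 0),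
              Int.ediv_eq_zero_of_lt hr0 hrlt']
            simp
          have hmod : (n - q) % (m : Int) = r := by
            rw [hnq, show q * (m:Int) + r = r + (m:Int) * q by ring,
              Int.add_mul_emod_self_left]
            exact Int.emod_eq_of_lt hr0 hrlt'
          rw [hfd, hmd, hdiv, hmod]
          have e1 : (((m+1:Nat):Int) - r).toNat = ((m:Int) - r).toNat + 1 := by omega
          rw [e1]
          ring

-- ===== VERDICT (by name: the statement is the Claim_ definition above) =====
theorem saperate_k_spec : Claim_equal_saperate_k := by
  intro n m _
  unfold Spec_saperate_k saperate_k saperate_k_alt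
  by_cases hm : m ≤ 0
  · simp [hm, PySem.List.pyRange_one_eq_nil hm]
  · have hmpos : 0 < m := by omega
    obtain ⟨mn, hmn⟩ : ∃ mn : Nat, m = (mn : Int) := ⟨m.toNat, by omega⟩
    subst hmn
    have hbody : (fun (st : Int × Int × Int) (_ : Int) =>
        let k := PySem.Int.floordiv st.2.2 st.2.1
        (st.1 * k, st.2.1 - 1, st.2.2 - k)) = (fun st _ => pvStepF st) := rfl
    rw [hbody, foldl_const_iterate pvStepF]
    have hlen : (PySem.List.pyRange 0 (mn : Int) 1).length = mn := by
      rw [PySem.List.length_pyRange_one]; omega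
    rw [hlen, iterate_pvStepF, pvLoop_closed mn (by exact_mod_cast hmpos)]
    rw [if_neg hm]
    ring
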